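-- pv_equiv track=rewrite | github.com/benrachmut/ExplainableDCOP | B_xdcop_files/Queries.py | get_values_to_remove_dict
-- ===== SOURCE A (Python) =====
-- def get_values_to_remove_dict(from_which_dict):
--     ans = {}
--
--
--     for dict_ in from_which_dict.values():
--         for variable_num, value in dict_.items():
--             if variable_num not in ans.keys():
--                 ans[variable_num] = [value]
--             elif value not in ans[variable_num]:
--                 ans[variable_num].append(value)
--     return  ans
-- ===== SOURCE B (Python) =====
-- def get_values_to_remove_dict(from_which_dict):
--     # Flatten everything into one (variable, value) stream; then, for each variable
--     # in first-seen order, rescan the stream to build its deduped value list.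
--     pairs = [(k, v) for d in from_which_dict.values() for k, v in d.items()]
--     ans = {}
--     for var, _ in pairs:
--         if var not in ans:
--             vals = []
--             for k, v in pairs:
--                 if k == var and v not in vals:
--                     vals.append(v)
--             ans[var] = vals
--     return ans
-- ===== Notes on version B (the rewrite author's own statement) =====
-- stated objective: alternative
-- what changed: Instead of A's single interleaved build-and-dedup over a growing dict, B flattens all inner dicts into one (variable, value) stream and then, for each variable in first-seen order, rescans the whole stream to assemble that variable's deduped value list; it trades one incremental dict update loop for a per-distinct-variable rescan of the flat stream.
import Mathlib
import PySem

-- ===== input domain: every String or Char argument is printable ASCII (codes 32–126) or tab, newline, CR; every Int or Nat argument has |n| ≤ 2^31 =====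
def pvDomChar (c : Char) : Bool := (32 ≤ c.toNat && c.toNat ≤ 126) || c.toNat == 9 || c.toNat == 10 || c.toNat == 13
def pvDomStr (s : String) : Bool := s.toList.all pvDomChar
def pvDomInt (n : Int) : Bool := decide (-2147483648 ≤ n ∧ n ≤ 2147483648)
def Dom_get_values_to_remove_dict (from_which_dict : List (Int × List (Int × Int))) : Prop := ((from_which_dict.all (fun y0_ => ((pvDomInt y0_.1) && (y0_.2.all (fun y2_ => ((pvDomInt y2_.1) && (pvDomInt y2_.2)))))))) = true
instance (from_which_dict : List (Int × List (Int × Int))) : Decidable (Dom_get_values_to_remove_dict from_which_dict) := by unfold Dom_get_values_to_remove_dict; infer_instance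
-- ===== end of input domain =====

-- B flattens all inner dicts into one (variable, value) stream and builds each variable's
-- deduped value list by rescanning the stream, instead of A's interleaved dict update
-- (objective: alternative; same return value proved for all inputs).

-- ===== PORT A =====
-- dicts are association lists (insertion order, first-match lookup); these two helpers are
-- `k in ans.keys()` / `ans[k]` lookup and in-place update of `ans[k]` (first matching entry).
def pvLookup (k : Int) : List (Int × List Int) → Option (List Int)
  | [] => none
  | (k', vs) :: rest => if k' = k then some vs else pvLookup k rest

def pvSet (k : Int) (vs : List Int) : List (Int × List Int) → List (Int × List Int)
  | [] => []
  | (k', vs') :: rest => if k' = k then (k', vs) :: rest else (k', vs') :: pvSet k vs rest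

-- one iteration of A's inner loop body: the `if not in keys / elif value not in` chain
def pvStepA (ans : List (Int × List Int)) (p : Int × Int) : List (Int × List Int) :=
  match pvLookup p.1 ans with
  | none => ans ++ [(p.1, [p.2])]                                  -- ans[variable_num] = [value]
  | some vs => if p.2 ∈ vs then ans else pvSet p.1 (vs ++ [p.2]) ans -- ans[variable_num].append(value)

def get_values_to_remove_dict (from_which_dict : List (Int × List (Int × Int))) : List (Int × List Int) :=
  -- for dict_ in from_which_dict.values(): for variable_num, value in dict_.items(): …
  from_which_dict.foldl (fun ans row => row.2.foldl pvStepA ans) []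

-- ===== PORT B =====
-- inner rescan: `for k, v in pairs: if k == var and v not in vals: vals.append(v)`
def pvCollect (pairs : List (Int × Int)) (var : Int) : List Int :=
  pairs.foldl (fun vals q => if q.1 = var ∧ q.2 ∉ vals then vals ++ [q.2] else vals) []

def get_values_to_remove_dict_alt (from_which_dict : List (Int × List (Int × Int))) : List (Int × List Int) :=
  -- pairs = [(k, v) for d in from_which_dict.values() for k, v in d.items()]
  let pairs := from_which_dict.flatMap (fun row => row.2)
  -- for var, _ in pairs: if var not in ans: ans[var] = <rescan of pairs>
  pairs.foldl (fun ans q =>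
    if ans.any (fun e => e.1 == q.1) then ans
    else ans ++ [(q.1, pvCollect pairs q.1)]) []

-- ===== PRECONDITION & SPEC =====
def Spec_get_values_to_remove_dict (from_which_dict : List (Int × List (Int × Int))) (out : List (Int × List Int)) : Prop := out = get_values_to_remove_dict_alt from_which_dict
instance (from_which_dict : List (Int × List (Int × Int))) (out : List (Int × List Int)) : Decidable (Spec_get_values_to_remove_dict from_which_dict out) := by unfold Spec_get_values_to_remove_dict; infer_instance

-- ===== CLAIM (what is proved, stated in full; the proofs are below) =====
def Claim_equal_get_values_to_remove_dict : Prop := ∀ (from_which_dict : List (Int × List (Int × Int))), Dom_get_values_to_remove_dict from_which_dict → Spec_get_values_to_remove_dict from_which_dict (get_values_to_remove_dict from_which_dict)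

-- ===== LEMMAS AND PROOFS =====

-- first-seen-order distinct keys of a flat pair list, from a given start
def pvKD (ks : List Int) (ps : List (Int × Int)) : List Int :=
  ps.foldl (fun ks q => if q.1 ∈ ks then ks else ks ++ [q.1]) ks

theorem pvKD_append (ks : List Int) (ps : List (Int × Int)) (p : Int × Int) :
    pvKD ks (ps ++ [p]) = if p.1 ∈ pvKD ks ps then pvKD ks ps else pvKD ks ps ++ [p.1] := by
  simp [pvKD, List.foldl_append]

theorem pvKD_mono (ps : List (Int × Int)) : ∀ (ks : List Int) (k : Int), k ∈ ks → k ∈ pvKD ks ps := by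
  induction ps with
  | nil => intro ks k h; exact h
  | cons q rest ih =>
    intro ks k h
    simp only [pvKD, List.foldl_cons]
    apply ih
    split_ifs <;> simp [h]

theorem pvKD_sub (ps : List (Int × Int)) : ∀ (ks : List Int) (q : Int × Int), q ∈ ps → q.1 ∈ pvKD ks ps := by
  induction ps with
  | nil => intro _ _ h; simp at h
  | cons a rest ih =>
    intro ks q hq
    rcases List.mem_cons.mp hq with h | h
    · subst h
      simp only [pvKD, List.foldl_cons]
      apply pvKD_mono
      split_ifs with ha <;> simp [ha]
    · exact ih _ q h

theorem pvKD_nodup (ps : List (Int × Int)) : ∀ (ks : List Int), ks.Nodup → (pvKD ks ps).Nodup := by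
  induction ps with
  | nil => intro ks h; exact h
  | cons q rest ih =>
    intro ks h
    simp only [pvKD, List.foldl_cons]
    apply ih
    split_ifs with hq
    · exact h
    · simp [List.nodup_append, h]
      exact fun a ha hb => hq (hb ▸ ha)

theorem pvLookup_map (k : Int) (g : Int → List Int) :
    ∀ ks : List Int, pvLookup k (ks.map (fun j => (j, g j))) = if k ∈ ks then some (g k) else none := by
  intro ks
  induction ks with
  | nil => simp [pvLookup]
  | cons j rest ih =>
    simp only [List.map_cons, pvLookup, ih]
    by_cases h : j = k
    · simp [h]
    · have hk : ¬ k = j := fun hh => h hh.symm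
      simp [h, hk]

theorem pvAny_map (k : Int) (g : Int → List Int) (ks : List Int) :
    (ks.map (fun j => (j, g j))).any (fun e => e.1 == k) = decide (k ∈ ks) := by
  induction ks with
  | nil => simp
  | cons j rest ih =>
    simp only [List.map_cons, List.any_cons, ih]
    by_cases h : j = k
    · simp [h]
    · have hk : ¬ k = j := fun hh => h hh.symm
      simp [h, hk]

theorem pvSet_map (k : Int) (vs : List Int) (g : Int → List Int) :
    ∀ ks : List Int, ks.Nodup →
      pvSet k vs (ks.map (fun j => (j, g j))) = ks.map (fun j => (j, if j = k then vs else g j)) := by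
  intro ks
  induction ks with
  | nil => intro _; rfl
  | cons j rest ih =>
    intro hnd
    rcases List.nodup_cons.mp hnd with ⟨hj, hrest⟩
    simp only [List.map_cons, pvSet]
    by_cases h : j = k
    · subst h
      rw [if_pos rfl]
      refine List.cons_eq_cons.mpr ⟨by simp, ?_⟩
      apply List.map_congr_left
      intro x hx
      have hx' : ¬ x = j := fun hxj => hj (hxj ▸ hx)
      simp [hx']
    · simp [h, ih hrest]

theorem pvCollect_stay (k : Int) (ps : List (Int × Int)) (h : ∀ q ∈ ps, q.1 ≠ k) :
    ∀ vals : List Int,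
      ps.foldl (fun vals q => if q.1 = k ∧ q.2 ∉ vals then vals ++ [q.2] else vals) vals = vals := by
  induction ps with
  | nil => intro _; rfl
  | cons q rest ih =>
    intro vals
    have hq : q.1 ≠ k := h q (by simp)
    simp only [List.foldl_cons, hq, false_and, if_false]
    exact ih (fun r hr => h r (by simp [hr])) vals

theorem pvCollect_append (ps : List (Int × Int)) (p : Int × Int) (k : Int) :
    pvCollect (ps ++ [p]) k =
      if p.1 = k ∧ p.2 ∉ pvCollect ps k then pvCollect ps k ++ [p.2] else pvCollect ps k := by
  simp [pvCollect, List.foldl_append]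

-- A's fold over the flat stream equals: first-seen keys, each mapped to its collected dedup list
theorem pvA_flat (ps : List (Int × Int)) :
    ps.foldl pvStepA [] = (pvKD [] ps).map (fun j => (j, pvCollect ps j)) := by
  induction ps using List.reverseRecOn with
  | nil => rfl
  | append_singleton ps p ih =>
    rw [List.foldl_append, List.foldl_cons, List.foldl_nil, ih, pvKD_append]
    have hnd : (pvKD [] ps).Nodup := pvKD_nodup ps [] (by simp)
    by_cases hmem : p.1 ∈ pvKD [] ps
    · simp only [pvStepA, pvLookup_map, if_pos hmem]
      by_cases hv : p.2 ∈ pvCollect ps p.1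
      · simp only [if_pos hv]
        apply List.map_congr_left
        intro j hj
        rw [pvCollect_append]
        by_cases hjp : p.1 = j
        · subst hjp; simp [hv]
        · simp [hjp]
      · simp only [if_neg hv]
        rw [pvSet_map _ _ _ _ hnd]
        apply List.map_congr_left
        intro j hj
        rw [pvCollect_append]
        by_cases hjp : j = p.1
        · subst hjp; simp [hv]
        · have hpj : ¬ p.1 = j := fun hh => hjp hh.symm
          simp [hjp, hpj]
    · simp only [pvStepA, pvLookup_map, if_neg hmem, List.map_append]
      congr 1
      · apply List.map_congr_left
        intro j hj
        rw [pvCollect_append]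
        have : ¬ p.1 = j := fun hh => hmem (hh ▸ hj)
        simp [this]
      · have hempty : pvCollect ps p.1 = [] := by
          apply pvCollect_stay
          intro q hq hqk
          exact hmem (hqk ▸ pvKD_sub ps [] q hq)
        rw [List.map_singleton, pvCollect_append]
        simp [hempty]

-- B's outer fold, generalized over the already-built prefix of keys
theorem pvB_fold (full : List (Int × Int)) (ps : List (Int × Int)) :
    ∀ ks : List Int,
      ps.foldl (fun ans q =>
          if ans.any (fun e => e.1 == q.1) then ans
          else ans ++ [(q.1, pvCollect full q.1)]) (ks.map (fun j => (j, pvCollect full j)))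
        = (pvKD ks ps).map (fun j => (j, pvCollect full j)) := by
  induction ps with
  | nil => intro _; rfl
  | cons q rest ih =>
    intro ks
    simp only [List.foldl_cons, pvKD, pvAny_map]
    by_cases h : q.1 ∈ ks
    · simpa [h] using ih ks
    · simp only [h, decide_false, if_false]
      have : (ks.map (fun j => (j, pvCollect full j))) ++ [(q.1, pvCollect full q.1)]
          = (ks ++ [q.1]).map (fun j => (j, pvCollect full j)) := by simp
      rw [this]
      exact ih (ks ++ [q.1])

theorem pvA_rows (rows : List (Int × List (Int × Int))) :
    ∀ acc : List (Int × List Int),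
      rows.foldl (fun ans row => row.2.foldl pvStepA ans) acc
        = (rows.flatMap (fun row => row.2)).foldl pvStepA acc := by
  induction rows with
  | nil => intro _; rfl
  | cons r rest ih => intro acc; simp [List.foldl_append, ih]

-- ===== VERDICT (by name: the statement is the Claim_ definition above) =====
theorem get_values_to_remove_dict_spec : Claim_equal_get_values_to_remove_dict := by
  intro d _
  show get_values_to_remove_dict d = get_values_to_remove_dict_alt d
  unfold get_values_to_remove_dict get_values_to_remove_dict_alt
  rw [pvA_rows, pvA_flat]
  exact (pvB_fold _ _ []).symm
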